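-- pv_equiv track=rewrite | github.com/Siddhart-Yadav/ai-code-review-agent | backend/app/services/semgrep_service.py | _reconstruct_files_from_diff
-- ===== SOURCE A (Python) =====
-- def _reconstruct_files_from_diff(diff_text: str) -> dict[str, str]:
--     """
--     Extract the '+' side of each file from a unified diff.
--     Returns {filename: reconstructed_content} for Semgrep to scan.
--     """
--     files: dict[str, str] = {}
--     current_file = None
--     lines: list[str] = []
--
--     for raw_line in diff_text.split("\n"):
--         if raw_line.startswith("+++ b/"):
--             if current_file and lines:
--                 files[current_file] = "\n".join(lines)
--             current_file = raw_line[6:]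
--             lines = []
--         elif raw_line.startswith("--- "):
--             continue
--         elif raw_line.startswith("diff --git"):
--             continue
--         elif raw_line.startswith("@@"):
--             continue
--         elif current_file is not None:
--             if raw_line.startswith("+"):
--                 lines.append(raw_line[1:])
--             elif raw_line.startswith("-"):
--                 continue
--             else:
--                 lines.append(raw_line[1:] if raw_line.startswith(" ") else raw_line)
--
--     if current_file and lines:
--         files[current_file] = "\n".join(lines)
--
--     return files
-- ===== SOURCE B (Python) =====
-- def _skip(line: str) -> bool:
--     return line.startswith(("--- ", "diff --git", "@@", "-"))
--
--
-- def _render(line: str) -> str: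
--     return line[1:] if line.startswith(("+", " ")) else line
--
--
-- def _reconstruct_files_from_diff(diff_text: str) -> dict[str, str]:
--     """Two-pass decomposition: find each '+++ b/' header, take the raw body up to
--     the next header, then filter/strip the body lines; insert under the same guard."""
--     all_lines = diff_text.split("\n")
--     files: dict[str, str] = {}
--     for i, line in enumerate(all_lines):
--         if line.startswith("+++ b/"):
--             body = []
--             for nxt in all_lines[i + 1:]:
--                 if nxt.startswith("+++ b/"):
--                     break
--                 body.append(nxt)
--             name = line[6:]
--             content = [_render(l) for l in body if not _skip(l)]
--             if name and content:
--                 files[name] = "\n".join(content)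
--     return files
-- ===== Notes on version B (the rewrite author's own statement) =====
-- stated objective: alternative
-- what changed: A's single stateful scan (current_file/lines accumulator flushed at each header and at EOF) is replaced by a two-pass decomposition: locate each file header line, scan its raw body up to the next header, then reconstruct that section's content with a filter+map over the body and insert under the same guard.
import Mathlib
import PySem

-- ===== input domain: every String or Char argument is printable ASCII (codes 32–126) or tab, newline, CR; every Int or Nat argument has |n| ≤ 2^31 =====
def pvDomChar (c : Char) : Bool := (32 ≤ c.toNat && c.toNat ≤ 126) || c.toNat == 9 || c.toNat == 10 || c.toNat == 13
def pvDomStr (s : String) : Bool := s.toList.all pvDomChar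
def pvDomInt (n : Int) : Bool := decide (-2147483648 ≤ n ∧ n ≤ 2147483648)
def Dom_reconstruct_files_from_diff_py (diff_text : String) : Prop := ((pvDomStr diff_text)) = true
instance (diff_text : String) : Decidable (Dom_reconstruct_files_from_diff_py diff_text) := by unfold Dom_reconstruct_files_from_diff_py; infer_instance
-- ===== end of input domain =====

-- B re-decomposes A's single stateful scan into header-driven sections (inner scan to the
-- next header, then filter+map the body); same values, different decomposition (objective: alternative).
-- (String prefix literals are written as Char lists: "+++ b/".toList = ['+','+','+',' ','b','/'], etc.)

-- ===== PORT A =====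
-- flush: `if current_file and lines: files[current_file] = "\n".join(lines)`
def aFlush (files : PySem.Dict (List Char) (List Char)) (cur : Option (List Char))
    (acc : List (List Char)) : PySem.Dict (List Char) (List Char) :=
  match cur with
  | some name => if name ≠ [] ∧ acc ≠ [] then files.insert name (PySem.Chars.join ['\n'] acc) else files
  | none => files

-- the `for raw_line in diff_text.split("\n")` loop, state (files, current_file, lines)
def aLoop : List (List Char) → PySem.Dict (List Char) (List Char) → Option (List Char) →
    List (List Char) → PySem.Dict (List Char) (List Char)
  | [], files, cur, acc => aFlush files cur acc
  | l :: rest, files, cur, acc =>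
    if PySem.Chars.startswith l ['+', '+', '+', ' ', 'b', '/'] then
      aLoop rest (aFlush files cur acc) (some (l.drop 6)) []   -- raw_line[6:] = drop 6
    else if PySem.Chars.startswith l ['-', '-', '-', ' '] then aLoop rest files cur acc
    else if PySem.Chars.startswith l ['d', 'i', 'f', 'f', ' ', '-', '-', 'g', 'i', 't'] then aLoop rest files cur acc
    else if PySem.Chars.startswith l ['@', '@'] then aLoop rest files cur acc
    else match cur with
      | none => aLoop rest files cur acc
      | some _ =>
        if PySem.Chars.startswith l ['+'] then aLoop rest files cur (acc ++ [l.drop 1])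
        else if PySem.Chars.startswith l ['-'] then aLoop rest files cur acc
        else aLoop rest files cur (acc ++ [if PySem.Chars.startswith l [' '] then l.drop 1 else l])

def reconstruct_files_from_diff_py (diff_text : String) : List (String × String) :=
  (aLoop (PySem.Chars.splitOn diff_text.toList ['\n']) PySem.Dict.empty none []).items.map
    (fun p => (String.ofList p.1, String.ofList p.2))

-- ===== PORT B =====
def bIsHeader (l : List Char) : Bool := PySem.Chars.startswith l ['+', '+', '+', ' ', 'b', '/']

def bSkip (l : List Char) : Bool :=
  PySem.Chars.startswith l ['-', '-', '-', ' '] ||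
    PySem.Chars.startswith l ['d', 'i', 'f', 'f', ' ', '-', '-', 'g', 'i', 't'] ||
    PySem.Chars.startswith l ['@', '@'] || PySem.Chars.startswith l ['-']

def bRender (l : List Char) : List Char :=
  if PySem.Chars.startswith l ['+'] || PySem.Chars.startswith l [' '] then l.drop 1 else l

-- outer `for i, line in enumerate(all_lines)`: at a header, scan the body up to the next
-- header, filter/render it, and insert under the same guard
def bGo : List (List Char) → PySem.Dict (List Char) (List Char) → PySem.Dict (List Char) (List Char)
  | [], files => files
  | l :: rest, files =>
    if bIsHeader l then
      let body := rest.takeWhile (fun x => !bIsHeader x)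
      let content := (body.filter (fun x => !bSkip x)).map bRender
      let name := l.drop 6
      bGo rest (if name ≠ [] ∧ content ≠ [] then files.insert name (PySem.Chars.join ['\n'] content) else files)
    else bGo rest files

def reconstruct_files_from_diff_py_alt (diff_text : String) : List (String × String) :=
  (bGo (PySem.Chars.splitOn diff_text.toList ['\n']) PySem.Dict.empty).items.map
    (fun p => (String.ofList p.1, String.ofList p.2))

-- ===== PRECONDITION & SPEC =====
def Spec_reconstruct_files_from_diff_py (diff_text : String) (out : List (String × String)) : Prop := out = reconstruct_files_from_diff_py_alt diff_text
instance (diff_text : String) (out : List (String × String)) : Decidable (Spec_reconstruct_files_from_diff_py diff_text out) := by unfold Spec_reconstruct_files_from_diff_py; infer_instance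

-- ===== CLAIM (what is proved, stated in full; the proofs are below) =====
def Claim_equal_reconstruct_files_from_diff_py : Prop := ∀ (diff_text : String), Dom_reconstruct_files_from_diff_py diff_text → Spec_reconstruct_files_from_diff_py diff_text (reconstruct_files_from_diff_py diff_text)

-- ===== LEMMAS AND PROOFS =====

-- B's per-section flush, as applied inside bGo
def bFlush (files : PySem.Dict (List Char) (List Char)) (name : List Char)
    (content : List (List Char)) : PySem.Dict (List Char) (List Char) :=
  if name ≠ [] ∧ content ≠ [] then files.insert name (PySem.Chars.join ['\n'] content) else files

-- a line starting with '+' is not skipped by bSkip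
theorem bSkip_of_plus {l : List Char} (h : PySem.Chars.startswith l ['+'] = true) :
    bSkip l = false := by
  obtain ⟨t, rfl⟩ := (PySem.Chars.startswith_iff l ['+']).mp h
  simp [bSkip, PySem.Chars.startswith, List.isPrefixOf]

-- A's loop inside a section = bGo after flushing the (rendered) rest of the section
theorem aLoop_some (ls : List (List Char)) : ∀ (files : PySem.Dict (List Char) (List Char))
    (name : List Char) (acc : List (List Char)),
    aLoop ls files (some name) acc
      = bGo ls (bFlush files name
          (acc ++ ((ls.takeWhile (fun x => !bIsHeader x)).filter (fun x => !bSkip x)).map bRender)) := by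
  induction ls with
  | nil => intro files name acc; simp [aLoop, bGo, aFlush, bFlush]
  | cons l rest ih =>
    intro files name acc
    cases hh : PySem.Chars.startswith l ['+', '+', '+', ' ', 'b', '/'] with
    | true =>
      have hih : bIsHeader l = true := hh
      rw [show aLoop (l :: rest) files (some name) acc
          = aLoop rest (aFlush files (some name) acc) (some (l.drop 6)) [] by
          simp [aLoop, hh]]
      rw [ih]
      simp [bGo, hih, bFlush, aFlush]
    | false =>
      have hnh : bIsHeader l = false := hh
      have hbgo : ∀ d, bGo (l :: rest) d = bGo rest d := by intro d; simp [bGo, hnh]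
      have htw : (l :: rest).takeWhile (fun x => !bIsHeader x)
          = l :: rest.takeWhile (fun x => !bIsHeader x) := by
        simp [List.takeWhile, hnh]
      rw [hbgo, htw]
      cases h1 : PySem.Chars.startswith l ['-', '-', '-', ' '] with
      | true =>
        have hs : bSkip l = true := by simp [bSkip, h1]
        rw [show aLoop (l :: rest) files (some name) acc = aLoop rest files (some name) acc by
          simp [aLoop, hh, h1]]
        rw [ih]; simp [hs]
      | false =>
      cases h2 : PySem.Chars.startswith l ['d', 'i', 'f', 'f', ' ', '-', '-', 'g', 'i', 't'] with
      | true =>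
        have hs : bSkip l = true := by simp [bSkip, h2]
        rw [show aLoop (l :: rest) files (some name) acc = aLoop rest files (some name) acc by
          simp [aLoop, hh, h1, h2]]
        rw [ih]; simp [hs]
      | false =>
      cases h3 : PySem.Chars.startswith l ['@', '@'] with
      | true =>
        have hs : bSkip l = true := by simp [bSkip, h3]
        rw [show aLoop (l :: rest) files (some name) acc = aLoop rest files (some name) acc by
          simp [aLoop, hh, h1, h2, h3]]
        rw [ih]; simp [hs]
      | false =>
      cases h4 : PySem.Chars.startswith l ['+'] with
      | true =>
        have hs : bSkip l = false := bSkip_of_plus h4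
        have hr : bRender l = l.drop 1 := by simp [bRender, h4]
        rw [show aLoop (l :: rest) files (some name) acc
            = aLoop rest files (some name) (acc ++ [l.drop 1]) by
          simp [aLoop, hh, h1, h2, h3, h4]]
        rw [ih]; simp [hs, hr]
      | false =>
      cases h5 : PySem.Chars.startswith l ['-'] with
      | true =>
        have hs : bSkip l = true := by simp [bSkip, h5]
        rw [show aLoop (l :: rest) files (some name) acc = aLoop rest files (some name) acc by
          simp [aLoop, hh, h1, h2, h3, h4, h5]]
        rw [ih]; simp [hs]
      | false =>
        have hs : bSkip l = false := by simp [bSkip, h1, h2, h3, h5]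
        have hr : bRender l = if PySem.Chars.startswith l [' '] then l.drop 1 else l := by
          simp [bRender, h4]
        rw [show aLoop (l :: rest) files (some name) acc
            = aLoop rest files (some name)
                (acc ++ [if PySem.Chars.startswith l [' '] then l.drop 1 else l]) by
          simp [aLoop, hh, h1, h2, h3, h4, h5]]
        rw [ih]; simp [hs, hr]

-- A's loop before the first header = bGo
theorem aLoop_none (ls : List (List Char)) : ∀ (files : PySem.Dict (List Char) (List Char))
    (acc : List (List Char)), aLoop ls files none acc = bGo ls files := by
  induction ls with
  | nil => intro files acc; simp [aLoop, bGo, aFlush]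
  | cons l rest ih =>
    intro files acc
    cases hh : PySem.Chars.startswith l ['+', '+', '+', ' ', 'b', '/'] with
    | true =>
      have hih : bIsHeader l = true := hh
      rw [show aLoop (l :: rest) files none acc
          = aLoop rest (aFlush files none acc) (some (l.drop 6)) [] by simp [aLoop, hh]]
      rw [aLoop_some]
      simp [bGo, hih, aFlush, bFlush]
    | false =>
      have hnh : bIsHeader l = false := hh
      have : aLoop (l :: rest) files none acc = aLoop rest files none acc := by
        simp only [aLoop, hh, Bool.false_eq_true, if_false]
        split_ifs <;> rfl
      rw [this, ih]
      simp [bGo, hnh]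

-- ===== VERDICT (by name: the statement is the Claim_ definition above) =====
theorem reconstruct_files_from_diff_py_spec : Claim_equal_reconstruct_files_from_diff_py := by
  intro diff_text _
  unfold Spec_reconstruct_files_from_diff_py reconstruct_files_from_diff_py reconstruct_files_from_diff_py_alt
  rw [aLoop_none]
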